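-- pv_equiv track=rewrite | github.com/Reprieven/AOIS | Lab3/TableMethod.py | compound_rows_depth
-- ===== SOURCE A (Python) =====
-- import math
-- from typing import List, Tuple
--
-- def count_area(rectangle)->int:
--     count = 0
--     for elem in rectangle:
--         if isinstance(elem, list):
--             count+=len(elem)
--         else:
--             count+=1
--     return count
--
-- def check_area(rectangle)->bool:
--     count = count_area(rectangle)
--     log_value = math.log2(count)
--     return log_value.is_integer()
--
-- def compound_rows_depth(split_rows: List):
--     result = split_rows.copy()
--     n = len(split_rows)
--     for i in range(n-1):
--         for j in range(i+1, n):
--             new_block = []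
--             block_i, coord_i = split_rows[i]
--             block_j, coord_j = split_rows[j]
--             if coord_i[0]==coord_j[0] and coord_i[1]+len(block_i) == coord_j[1]:
--                 new_block = block_i+block_j
--                 new_coord = (min(coord_i[0], coord_j[0]), coord_i[1])
--             if new_block and check_area(new_block):
--                 result.append((new_block, new_coord))
--     return result
-- ===== SOURCE B (Python) =====
-- def compound_rows_depth(split_rows):
--     # Index blocks by their start coordinate once, then look up the unique
--     # adjacent start per block instead of scanning all pairs.
--     index = {}
--     for j, (block, coord) in enumerate(split_rows):
--         index.setdefault(coord, []).append((j, block))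
--     result = list(split_rows)
--     for i, (bi, ci) in enumerate(split_rows):
--         for j, bj in index.get((ci[0], ci[1] + len(bi)), []):
--             if j > i:
--                 m = len(bi) + len(bj)
--                 if m != 0 and 2 ** (m.bit_length() - 1) == m:
--                     result.append((bi + bj, ci))
--     return result
-- ===== Notes on version B (the rewrite author's own statement) =====
-- stated objective: faster
-- what changed: Replaces the all-pairs double scan with a dict indexing blocks by start coordinate built in one pass, so each block looks up only its horizontally adjacent candidates.
import Mathlib
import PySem

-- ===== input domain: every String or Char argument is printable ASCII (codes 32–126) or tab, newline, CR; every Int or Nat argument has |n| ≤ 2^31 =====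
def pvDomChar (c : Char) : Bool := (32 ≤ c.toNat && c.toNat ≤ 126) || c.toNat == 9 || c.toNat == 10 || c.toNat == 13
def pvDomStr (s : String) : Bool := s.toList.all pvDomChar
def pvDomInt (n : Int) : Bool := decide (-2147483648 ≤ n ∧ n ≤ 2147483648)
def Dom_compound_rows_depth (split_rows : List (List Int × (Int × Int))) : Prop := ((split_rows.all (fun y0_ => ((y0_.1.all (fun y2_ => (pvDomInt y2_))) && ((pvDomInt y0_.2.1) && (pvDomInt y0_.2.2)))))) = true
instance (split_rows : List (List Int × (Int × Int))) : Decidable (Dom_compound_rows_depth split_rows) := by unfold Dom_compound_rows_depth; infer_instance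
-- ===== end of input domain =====

-- B replaces A's all-pairs scan with a one-pass dict index by start coordinate (asymptotically faster).

-- ===== PORT A =====
-- elements of a block are ints (never lists), so the isinstance branch never fires
def count_area (rectangle : List Int) : Int :=
  rectangle.foldl (fun count _ => count + 1) 0

-- math.log2(count).is_integer(): count is an exact power of two; ported as
-- 2^(log2 count) = count, exact for the positive counts this code reaches
def check_area (rectangle : List Int) : Bool :=
  let count := count_area rectangle
  decide (0 < count) && decide ((2 : Int) ^ Nat.log2 count.toNat = count)

-- range(...) → pyRange, split_rows[i] → pyGetD (indices are always in range);
-- 'new_block = []' then conditional rebuild + 'if new_block and …' is ported as the equivalent nesting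
def compound_rows_depth (split_rows : List (List Int × (Int × Int))) : List (List Int × (Int × Int)) :=
  let n : Int := split_rows.length
  (PySem.List.pyRange 0 (n - 1) 1).foldl (fun result i =>
    (PySem.List.pyRange (i + 1) n 1).foldl (fun result j =>
      let pi := PySem.List.pyGetD split_rows i ([], (0, 0))
      let pj := PySem.List.pyGetD split_rows j ([], (0, 0))
      if pi.2.1 = pj.2.1 ∧ pi.2.2 + (pi.1.length : Int) = pj.2.2 then
        let new_block := pi.1 ++ pj.1
        let new_coord := (min pi.2.1 pj.2.1, pi.2.2)
        if new_block ≠ [] ∧ check_area new_block then result ++ [(new_block, new_coord)]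
        else result
      else result) result) split_rows

-- ===== PORT B =====
-- m.bit_length() for the m ≥ 1 the short-circuit admits is Nat.log2 m + 1
def compound_rows_depth_alt (split_rows : List (List Int × (Int × Int))) : List (List Int × (Int × Int)) :=
  let index := (PySem.List.enumerate split_rows).foldl
      (fun d p => d.modify p.2.2 [] (· ++ [(p.1, p.2.1)])) PySem.Dict.empty
  (PySem.List.enumerate split_rows).foldl (fun result p =>
    (index.getD (p.2.2.1, p.2.2.2 + (p.2.1.length : Int)) []).foldl (fun result q =>
      if q.1 > p.1 then
        let m := p.2.1.length + q.2.length
        if m ≠ 0 ∧ 2 ^ (Nat.log2 m + 1 - 1) = m then result ++ [(p.2.1 ++ q.2, p.2.2)]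
        else result
      else result) result) split_rows

-- ===== PRECONDITION & SPEC =====
def Spec_compound_rows_depth (split_rows : List (List Int × (Int × Int))) (out : List (List Int × (Int × Int))) : Prop := out = compound_rows_depth_alt split_rows
instance (split_rows : List (List Int × (Int × Int))) (out : List (List Int × (Int × Int))) : Decidable (Spec_compound_rows_depth split_rows out) := by unfold Spec_compound_rows_depth; infer_instance

-- ===== CLAIM (what is proved, stated in full; the proofs are below) =====
def Claim_equal_compound_rows_depth : Prop := ∀ (split_rows : List (List Int × (Int × Int))), Dom_compound_rows_depth split_rows → Spec_compound_rows_depth split_rows (compound_rows_depth split_rows)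

-- ===== LEMMAS AND PROOFS =====

-- default used by the proofs for pyGetD (indices are always in range, so it is never returned)
def pvD0 : List Int × (Int × Int) := ([], (0, 0))

-- the contribution of the pair (i, j) in A's inner loop
def pvMergeA (sr : List (List Int × (Int × Int))) (i j : Int) : List (List Int × (Int × Int)) :=
  let pi := PySem.List.pyGetD sr i pvD0
  let pj := PySem.List.pyGetD sr j pvD0
  if pi.2.1 = pj.2.1 ∧ pi.2.2 + (pi.1.length : Int) = pj.2.2 then
    if pi.1 ++ pj.1 ≠ [] ∧ check_area (pi.1 ++ pj.1) then
      [(pi.1 ++ pj.1, (min pi.2.1 pj.2.1, pi.2.2))]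
    else []
  else []

-- the body of B's inner loop, as a list-valued function
def pvH (p : Int × (List Int × (Int × Int))) (q : Int × List Int) : List (List Int × (Int × Int)) :=
  if q.1 > p.1 then
    if p.2.1.length + q.2.length ≠ 0 ∧
        2 ^ (Nat.log2 (p.2.1.length + q.2.length) + 1 - 1) = p.2.1.length + q.2.length then
      [(p.2.1 ++ q.2, p.2.2)]
    else []
  else []

-- the contribution of the pair (i, j) in B, after resolving the dict lookup
def pvB (sr : List (List Int × (Int × Int))) (i j : Int) : List (List Int × (Int × Int)) :=
  if (PySem.List.pyGetD sr j pvD0).2 ==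
      ((PySem.List.pyGetD sr i pvD0).2.1,
       (PySem.List.pyGetD sr i pvD0).2.2 + ((PySem.List.pyGetD sr i pvD0).1.length : Int)) then
    pvH (i, PySem.List.pyGetD sr i pvD0) (j, (PySem.List.pyGetD sr j pvD0).1)
  else []

theorem pv_flatMap_congr {α β : Type} {l : List α} {f g : α → List β}
    (h : ∀ x ∈ l, f x = g x) : l.flatMap f = l.flatMap g := by
  induction l with
  | nil => rfl
  | cons x t ih =>
      simp only [List.flatMap_cons, h x (List.mem_cons_self), ih fun y hy => h y (List.mem_cons_of_mem _ hy)]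

theorem pv_flatMap_filter {α β : Type} (q : α → Bool) (h : α → List β) (l : List α) :
    (l.filter q).flatMap h = l.flatMap (fun x => if q x then h x else []) := by
  induction l with
  | nil => rfl
  | cons x t ih =>
      by_cases hx : q x = true <;> simp [hx, ih]

theorem pv_idx_getD (l : List (Int × (List Int × (Int × Int))))
    (d : PySem.Dict (Int × Int) (List (Int × List Int))) (c : Int × Int) :
    (l.foldl (fun d p => d.modify p.2.2 [] (· ++ [(p.1, p.2.1)])) d).getD c []
      = d.getD c [] ++ (l.filter (fun p => p.2.2 == c)).map (fun p => (p.1, p.2.1)) := by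
  induction l generalizing d with
  | nil => simp
  | cons p t ih =>
      simp only [List.foldl_cons, ih, PySem.Dict.getD_modify, List.filter_cons]
      by_cases hc : p.2.2 = c
      · subst hc; simp
      · have h1 : (c = p.2.2) = False := eq_false (fun h => hc h.symm)
        have h2 : (p.2.2 == c) = false := beq_eq_false_iff_ne.mpr hc
        simp [h1, h2]

theorem pv_count_area_eq (r : List Int) : count_area r = (r.length : Int) := by
  have h : ∀ (r : List Int) (a : Int), r.foldl (fun c _ => c + 1) a = a + r.length := by
    intro r
    induction r with
    | nil => intro a; simp
    | cons x t ih => intro a; simp [ih]; ring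
  simpa using h r 0

theorem pv_guard_iff (bi bj : List Int) :
    (bi ++ bj ≠ [] ∧ check_area (bi ++ bj) = true) ↔
      (bi.length + bj.length ≠ 0 ∧
        2 ^ (Nat.log2 (bi.length + bj.length) + 1 - 1) = bi.length + bj.length) := by
  have hlen : (bi ++ bj).length = bi.length + bj.length := List.length_append
  have hne : (bi ++ bj ≠ []) ↔ bi.length + bj.length ≠ 0 := by
    rw [← hlen]
    exact (not_congr List.length_eq_zero_iff).symm
  unfold check_area
  rw [pv_count_area_eq, hlen]
  set m := bi.length + bj.length with hm
  simp only [Bool.and_eq_true, decide_eq_true_eq, Int.toNat_natCast, Nat.add_sub_cancel]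
  constructor
  · rintro ⟨h1, h2, h3⟩
    exact ⟨hne.mp h1, by exact_mod_cast h3⟩
  · rintro ⟨h1, h2⟩
    exact ⟨hne.mpr h1, by exact_mod_cast Nat.pos_of_ne_zero h1, by exact_mod_cast h2⟩

-- A in flatMap shape
theorem pv_A_shape (sr : List (List Int × (Int × Int))) :
    compound_rows_depth sr
      = sr ++ (PySem.List.pyRange 0 ((sr.length : Int) - 1)).flatMap
          (fun i => (PySem.List.pyRange (i + 1) (sr.length : Int)).flatMap (pvMergeA sr i)) := by
  unfold compound_rows_depth
  have hin : ∀ (i : Int) (acc : List (List Int × (Int × Int))),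
      (PySem.List.pyRange (i + 1) (sr.length : Int)).foldl
        (fun result j =>
          let pi := PySem.List.pyGetD sr i ([], (0, 0))
          let pj := PySem.List.pyGetD sr j ([], (0, 0))
          if pi.2.1 = pj.2.1 ∧ pi.2.2 + (pi.1.length : Int) = pj.2.2 then
            let new_block := pi.1 ++ pj.1
            let new_coord := (min pi.2.1 pj.2.1, pi.2.2)
            if new_block ≠ [] ∧ check_area new_block then result ++ [(new_block, new_coord)]
            else result
          else result) acc
        = acc ++ (PySem.List.pyRange (i + 1) (sr.length : Int)).flatMap (pvMergeA sr i) := by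
    intro i acc
    rw [List.foldl_ext _ (fun acc j => acc ++ pvMergeA sr i j) acc
      (by intro acc j _; simp only [pvMergeA, pvD0]; split_ifs <;> simp)]
    exact PySem.List.foldl_append_eq_flatMap _ _ _
  rw [List.foldl_ext _
      (fun result i => result ++ (PySem.List.pyRange (i + 1) (sr.length : Int)).flatMap (pvMergeA sr i)) sr
      (by intro acc i _; exact hin i acc)]
  exact PySem.List.foldl_append_eq_flatMap _ _ _

-- B in flatMap shape
theorem pv_B_shape (sr : List (List Int × (Int × Int))) :
    compound_rows_depth_alt sr
      = sr ++ (PySem.List.pyRange 0 (sr.length : Int)).flatMap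
          (fun i => (PySem.List.pyRange 0 (sr.length : Int)).flatMap (pvB sr i)) := by
  unfold compound_rows_depth_alt
  set idx := (PySem.List.enumerate sr).foldl
      (fun d p => d.modify p.2.2 [] (· ++ [(p.1, p.2.1)])) PySem.Dict.empty with hidxdef
  have hidx : ∀ c, idx.getD c []
      = ((PySem.List.enumerate sr).filter (fun p => p.2.2 == c)).map (fun p => (p.1, p.2.1)) := by
    intro c
    simpa using pv_idx_getD (PySem.List.enumerate sr) PySem.Dict.empty c
  have hin : ∀ (p : Int × (List Int × (Int × Int))) (acc : List (List Int × (Int × Int))),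
      (idx.getD (p.2.2.1, p.2.2.2 + (p.2.1.length : Int)) []).foldl
        (fun result q =>
          if q.1 > p.1 then
            let m := p.2.1.length + q.2.length
            if m ≠ 0 ∧ 2 ^ (Nat.log2 m + 1 - 1) = m then result ++ [(p.2.1 ++ q.2, p.2.2)]
            else result
          else result) acc
        = acc ++ (idx.getD (p.2.2.1, p.2.2.2 + (p.2.1.length : Int)) []).flatMap (pvH p) := by
    intro p acc
    rw [List.foldl_ext _ (fun acc q => acc ++ pvH p q) acc
      (by intro acc q _; simp only [pvH]; split_ifs <;> simp)]
    exact PySem.List.foldl_append_eq_flatMap _ _ _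
  rw [List.foldl_ext _
      (fun result p => result ++ (idx.getD (p.2.2.1, p.2.2.2 + (p.2.1.length : Int)) []).flatMap (pvH p)) sr
      (by intro acc p _; exact hin p acc)]
  rw [PySem.List.foldl_append_eq_flatMap]
  congr 1
  have hE : PySem.List.enumerate sr
      = (PySem.List.pyRange 0 (sr.length : Int)).map (fun j => (j, PySem.List.pyGetD sr j pvD0)) := by
    simpa [PySem.List.len] using PySem.List.enumerate_eq_map_pyRange sr pvD0
  conv_lhs => rw [hE]
  rw [List.flatMap_map]
  apply pv_flatMap_congr
  intro i _
  rw [hidx, List.flatMap_map, pv_flatMap_filter]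
  conv_lhs => rw [hE]
  rw [List.flatMap_map]
  apply pv_flatMap_congr
  intro j _
  simp only [pvB]

-- per-pair equality for i < j
theorem pv_pointwise (sr : List (List Int × (Int × Int))) (i j : Int) (hij : i < j) :
    pvMergeA sr i j = pvB sr i j := by
  simp only [pvMergeA, pvB, pvH]
  set pi := PySem.List.pyGetD sr i pvD0 with hpi
  set pj := PySem.List.pyGetD sr j pvD0 with hpj
  by_cases hc : pi.2.1 = pj.2.1 ∧ pi.2.2 + (pi.1.length : Int) = pj.2.2
  · have hbe : (pj.2 == (pi.2.1, pi.2.2 + (pi.1.length : Int))) = true := by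
      rw [beq_iff_eq]
      exact Prod.ext_iff.mpr ⟨hc.1.symm, hc.2.symm⟩
    rw [if_pos hc, if_pos hbe, if_pos hij]
    by_cases hg : pi.1 ++ pj.1 ≠ [] ∧ check_area (pi.1 ++ pj.1) = true
    · rw [if_pos hg, if_pos ((pv_guard_iff pi.1 pj.1).mp hg)]
      have : min pi.2.1 pj.2.1 = pi.2.1 := by rw [hc.1, min_self]
      rw [this]
    · rw [if_neg hg, if_neg (fun h => hg ((pv_guard_iff pi.1 pj.1).mpr h))]
  · have hbe : ¬ (pj.2 == (pi.2.1, pi.2.2 + (pi.1.length : Int))) = true := by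
      rw [beq_iff_eq]
      intro h
      exact hc ⟨(Prod.ext_iff.mp h).1.symm, (Prod.ext_iff.mp h).2.symm⟩
    rw [if_neg hc, if_neg hbe]

theorem pv_B_nil_of_le (sr : List (List Int × (Int × Int))) (i j : Int) (hij : j ≤ i) :
    pvB sr i j = [] := by
  simp only [pvB, pvH]
  split_ifs <;> first | rfl | omega

theorem pv_ranges_eq (sr : List (List Int × (Int × Int))) :
    (PySem.List.pyRange 0 ((sr.length : Int) - 1)).flatMap
        (fun i => (PySem.List.pyRange (i + 1) (sr.length : Int)).flatMap (pvMergeA sr i))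
      = (PySem.List.pyRange 0 (sr.length : Int)).flatMap
          (fun i => (PySem.List.pyRange 0 (sr.length : Int)).flatMap (pvB sr i)) := by
  set n : Int := (sr.length : Int) with hn
  have hn0 : 0 ≤ n := by rw [hn]; exact Int.natCast_nonneg _
  by_cases hz : n = 0
  · simp [PySem.List.pyRange_one_eq_nil (by omega : n ≤ (0:Int)),
      PySem.List.pyRange_one_eq_nil (by omega : n - 1 ≤ (0:Int))]
  · have h1n : (1:Int) ≤ n := by omega
    have hsplit : PySem.List.pyRange 0 n = PySem.List.pyRange 0 (n - 1) ++ [n - 1] := by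
      have := PySem.List.pyRange_one_succ_right (a := 0) (b := n - 1) (by omega)
      simpa [sub_add_cancel] using this
    have hlast : (PySem.List.pyRange 0 n).flatMap (pvB sr (n - 1)) = [] := by
      rw [List.flatMap_eq_nil_iff]
      intro j hj
      exact pv_B_nil_of_le sr (n - 1) j (by have := PySem.List.mem_pyRange_one.mp hj; omega)
    rw [show (PySem.List.pyRange 0 n).flatMap (fun i => (PySem.List.pyRange 0 n).flatMap (pvB sr i))
          = (PySem.List.pyRange 0 (n - 1) ++ [n - 1]).flatMap
              (fun i => (PySem.List.pyRange 0 n).flatMap (pvB sr i)) from by rw [hsplit]]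
    rw [List.flatMap_append, List.flatMap_cons, List.flatMap_nil, List.append_nil, hlast,
      List.append_nil]
    apply pv_flatMap_congr
    intro i hi
    have hi' := PySem.List.mem_pyRange_one.mp hi
    rw [PySem.List.pyRange_one_append 0 (i + 1) n (by omega) (by omega), List.flatMap_append]
    have h0 : (PySem.List.pyRange 0 (i + 1)).flatMap (pvB sr i) = [] := by
      rw [List.flatMap_eq_nil_iff]
      intro j hj
      exact pv_B_nil_of_le sr i j (by have := PySem.List.mem_pyRange_one.mp hj; omega)
    rw [h0, List.nil_append]
    apply pv_flatMap_congr
    intro j hj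
    exact pv_pointwise sr i j (by have := PySem.List.mem_pyRange_one.mp hj; omega)

theorem compound_rows_depth_main (sr : List (List Int × (Int × Int))) :
    compound_rows_depth sr = compound_rows_depth_alt sr := by
  rw [pv_A_shape, pv_B_shape, pv_ranges_eq]

-- ===== VERDICT (by name: the statement is the Claim_ definition above) =====
theorem compound_rows_depth_spec : Claim_equal_compound_rows_depth := by
  intro sr _
  exact compound_rows_depth_main sr
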